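-- pv_equiv track=rewrite | github.com/tdieudonne/DigitsToWords-converter | convert_to_words.py | convert_group
-- ===== SOURCE A (Python) =====
-- def convert_group(xyz, available_numbers):
-- 	tmp_2_group = ""
-- 	in_words = ""
-- 	tmp_xyz = int(xyz)
-- 	if (int(xyz) in available_numbers):
-- 		if int(xyz) != 0:
-- 			return available_numbers[int(xyz)]
-- 		if int(xyz) == 0:
-- 			return ""
-- 	first_digit = 0
-- 	while tmp_xyz > 0:
-- 		remainder = tmp_xyz%10
-- 		tmp_2_group = str(remainder)+tmp_2_group
-- 		if (len(tmp_2_group) == 2):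
-- 			first_digit = tmp_xyz//10
-- 			if int(tmp_2_group) in available_numbers:
-- 				in_words = available_numbers[int(tmp_2_group)]
-- 				if first_digit == 0:
-- 					return in_words
-- 				break
-- 			else:
-- 				word1 = available_numbers[int(tmp_2_group[0])*10]
-- 				word2 = available_numbers[int(tmp_2_group[1])]
-- 				in_words = "{} {}".format(word1, word2)
-- 				if first_digit == 0:
-- 					return in_words
-- 				break
-- 		tmp_xyz = tmp_xyz//10
-- 	first_digit_in_words = "{} {}".format(available_numbers[first_digit], available_numbers[100])
-- 	in_words = "{} {}".format(first_digit_in_words, in_words)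
-- 	return in_words
--
-- available_numbers = {
-- 	0:"Zero",1:"One",2:"Two",3:"Three",4:"Four",5:"Five",6:"Six",7:"Seven",8:"Eight",9:"Nine",10:"Ten",
-- 	11:"Eleven",12:"Twelve",13:"Thirteen",14:"Fourteen",15:"Fifteen",16:"Sixteen",17:"Seventeen",18:"Eighteen",19:"Nineteen",20:"Twenty",
-- 	30:"Thirty",40:"Forty",50:"Fifty",60:"Sixty",70:"Seventy",80:"Eighty",90:"Ninenty",100:"Hundred",
-- 	1000:"Thousand",1000000:"Million", 1000000000:"Billion"
-- }
-- ===== SOURCE B (Python) =====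
-- def convert_group(xyz, available_numbers):
--     n = int(xyz)
--     if n in available_numbers:
--         return available_numbers[n] if n != 0 else ""
--     last2 = n % 100
--     if last2 in available_numbers:
--         tail = available_numbers[last2]
--     else:
--         tail = "{} {}".format(available_numbers[last2 // 10 * 10],
--                               available_numbers[last2 % 10])
--     hundreds = n // 100
--     if hundreds == 0:
--         return tail
--     return "{} {} {}".format(available_numbers[hundreds],
--                              available_numbers[100], tail)
-- ===== Notes on version B (the rewrite author's own statement) =====
-- stated objective: simpler
-- what changed: Replaces A's digit-peeling while-loop that rebuilds the last two digits as a string and re-parses it with int() by a direct arithmetic split n%100 / n//100 and straight-line formatting.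
-- outside the precondition, e.g. on convert_group(5, {0: 'Zero', 100: 'Hundred'}): A returns 'Zero Hundred ', B raises KeyError; on convert_group(-150, {0: 'Zero', 100: 'Hundred'}): A returns 'Zero Hundred ', B raises KeyError
import Mathlib
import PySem

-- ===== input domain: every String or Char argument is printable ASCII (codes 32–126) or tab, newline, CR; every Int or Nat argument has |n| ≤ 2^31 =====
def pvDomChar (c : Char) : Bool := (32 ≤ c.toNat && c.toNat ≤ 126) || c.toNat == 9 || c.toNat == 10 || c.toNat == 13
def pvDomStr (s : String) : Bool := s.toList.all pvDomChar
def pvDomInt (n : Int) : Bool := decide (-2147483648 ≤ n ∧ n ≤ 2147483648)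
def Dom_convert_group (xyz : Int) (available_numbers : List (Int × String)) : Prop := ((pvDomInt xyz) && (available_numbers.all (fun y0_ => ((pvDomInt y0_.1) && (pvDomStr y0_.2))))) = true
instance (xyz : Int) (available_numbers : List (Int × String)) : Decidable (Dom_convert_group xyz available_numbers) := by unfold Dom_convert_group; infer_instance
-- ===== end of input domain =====

-- B replaces A's digit-peeling loop (string build + int() re-parse) by the arithmetic split
-- n%100 / n//100; equivalence is about the return value only (neither side mutates anything).

-- ===== PORT A =====
-- Python dict lookup: the assoc list is the dict's items in insertion order (overwrite keeps position).
def pyDictGet? (d : List (Int × String)) (k : Int) : Option String :=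
  PySem.Dict.get? (PySem.Dict.ofList d) k

-- int(c) for a one-character string; exact on digit characters (the only ones reaching it).
def pyCharInt (c : Char) : Int := (PySem.Int.ofChars? [c]).getD 0

-- the while-loop of A; returns .inl s for an early `return s`, .inr (first_digit, in_words) on break/exit
def cgLoop (d : List (Int × String)) (tmp : Int) (group : List Char) : Sum String (Int × String) :=
  if _h : 0 < tmp then
    let group' := PySem.Int.toChars (PySem.Int.mod tmp 10) ++ group  -- str(remainder)+tmp_2_group
    if group'.length = 2 then
      let fd := PySem.Int.floordiv tmp 10
      let g := (PySem.Int.ofChars? group').getD 0  -- int(tmp_2_group); chars are digits, default unreachable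
      match pyDictGet? d g with
      | some w => if fd = 0 then .inl w else .inr (fd, w)
      | none =>
        match group' with
        | [c0, c1] =>  -- tmp_2_group[0], tmp_2_group[1] (length is 2 in this branch)
          let w1 := (pyDictGet? d (pyCharInt c0 * 10)).getD ""  -- KeyError excluded by Pre_
          let w2 := (pyDictGet? d (pyCharInt c1)).getD ""       -- KeyError excluded by Pre_
          let inw := w1 ++ " " ++ w2
          if fd = 0 then .inl inw else .inr (fd, inw)
        | _ => .inl ""  -- unreachable (length = 2)
    else cgLoop d (PySem.Int.floordiv tmp 10) group'
  else .inr (0, "")  -- normal exit: first_digit and in_words keep their initial values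
termination_by tmp.toNat
decreasing_by
  rw [PySem.Int.floordiv_eq_ediv_of_pos (by norm_num)]
  omega

def convert_group (xyz : Int) (available_numbers : List (Int × String)) : String :=
  match pyDictGet? available_numbers xyz with
  | some w => if xyz = 0 then "" else w
  | none =>
    match cgLoop available_numbers xyz [] with
    | .inl s => s
    | .inr (fd, inw) =>
      let fdw := (pyDictGet? available_numbers fd).getD "" ++ " " ++
                 (pyDictGet? available_numbers 100).getD ""   -- KeyError excluded by Pre_
      fdw ++ " " ++ inw

-- ===== PORT B =====
def convert_group_alt (xyz : Int) (available_numbers : List (Int × String)) : String :=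
  match pyDictGet? available_numbers xyz with
  | some w => if xyz = 0 then "" else w
  | none =>
    let last2 := PySem.Int.mod xyz 100
    let tail :=
      match pyDictGet? available_numbers last2 with
      | some w => w
      | none =>
        (pyDictGet? available_numbers (PySem.Int.floordiv last2 10 * 10)).getD "" ++ " " ++
        (pyDictGet? available_numbers (PySem.Int.mod last2 10)).getD ""   -- KeyError excluded by Pre_
    let hundreds := PySem.Int.floordiv xyz 100
    if hundreds = 0 then tail
    else (pyDictGet? available_numbers hundreds).getD "" ++ " " ++
         (pyDictGet? available_numbers 100).getD "" ++ " " ++ tail       -- KeyError excluded by Pre_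

-- ===== PRECONDITION & SPEC =====
-- Pre_ excludes (a) inputs where a needed table key is absent, on which A raises KeyError, and
-- (b) non-member inputs below 10 (negatives, 0..9), on which A skips/falls out of its loop and
-- returns the accidental string "dict[0] dict[100] " with a trailing space, while B's arithmetic
-- split naturally raises KeyError there.
def Pre_convert_group (xyz : Int) (available_numbers : List (Int × String)) : Prop :=
  (pyDictGet? available_numbers xyz).isSome ∨
  (10 ≤ xyz ∧
    ((pyDictGet? available_numbers (PySem.Int.mod xyz 100)).isSome ∨
      ((pyDictGet? available_numbers (PySem.Int.floordiv (PySem.Int.mod xyz 100) 10 * 10)).isSome ∧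
       (pyDictGet? available_numbers (PySem.Int.mod xyz 10)).isSome)) ∧
    (PySem.Int.floordiv xyz 100 = 0 ∨
      ((pyDictGet? available_numbers (PySem.Int.floordiv xyz 100)).isSome ∧
       (pyDictGet? available_numbers 100).isSome)))
instance (xyz : Int) (available_numbers : List (Int × String)) : Decidable (Pre_convert_group xyz available_numbers) := by
  unfold Pre_convert_group; infer_instance

def pvWitness_convert_group : Int × (List (Int × String)) :=
  (205, [(2, "Two"), (100, "Hundred"), (0, "Zero"), (5, "Five")])

def Spec_convert_group (xyz : Int) (available_numbers : List (Int × String)) (out : String) : Prop := out = convert_group_alt xyz available_numbers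
instance (xyz : Int) (available_numbers : List (Int × String)) (out : String) : Decidable (Spec_convert_group xyz available_numbers out) := by unfold Spec_convert_group; infer_instance

-- ===== CLAIM (what is proved, stated in full; the proofs are below) =====
def Claim_equal_convert_group : Prop := ∀ (xyz : Int) (available_numbers : List (Int × String)), Dom_convert_group xyz available_numbers → Pre_convert_group xyz available_numbers → Spec_convert_group xyz available_numbers (convert_group xyz available_numbers)

-- ===== LEMMAS AND PROOFS =====

lemma toChars_digit (r : Int) (h0 : 0 ≤ r) (h1 : r < 10) :
    PySem.Int.toChars r = [Char.ofNat (48 + r.toNat)] := by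
  interval_cases r <;> decide

lemma ofChars_two (a b : Int) (ha0 : 0 ≤ a) (ha : a < 10) (hb0 : 0 ≤ b) (hb : b < 10) :
    PySem.Int.ofChars? [Char.ofNat (48 + b.toNat), Char.ofNat (48 + a.toNat)] = some (10 * b + a) := by
  interval_cases a <;> interval_cases b <;> decide

lemma pyCharInt_digit (a : Int) (h0 : 0 ≤ a) (h1 : a < 10) :
    pyCharInt (Char.ofNat (48 + a.toNat)) = a := by
  interval_cases a <;> decide

-- A's loop on a two-or-more-digit nonnegative input, evaluated to its arithmetic form.
lemma cgLoop_eval (d : List (Int × String)) (xyz : Int) (h : 10 ≤ xyz) :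
    cgLoop d xyz [] =
      (match pyDictGet? d (xyz % 100) with
       | some w => if xyz / 100 = 0 then .inl w else .inr (xyz / 100, w)
       | none =>
         let inw := (pyDictGet? d (xyz % 100 / 10 * 10)).getD "" ++ " " ++
                    (pyDictGet? d (xyz % 10)).getD ""
         if xyz / 100 = 0 then .inl inw else .inr (xyz / 100, inw)) := by
  have hm : PySem.Int.mod xyz 10 = xyz % 10 := PySem.Int.mod_eq_emod_of_pos (by norm_num)
  have hd : PySem.Int.floordiv xyz 10 = xyz / 10 := PySem.Int.floordiv_eq_ediv_of_pos (by norm_num)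
  have hm2 : PySem.Int.mod (xyz / 10) 10 = xyz / 10 % 10 := PySem.Int.mod_eq_emod_of_pos (by norm_num)
  have hd2 : PySem.Int.floordiv (xyz / 10) 10 = xyz / 10 / 10 := PySem.Int.floordiv_eq_ediv_of_pos (by norm_num)
  have ha0 : 0 ≤ xyz % 10 := by omega
  have ha1 : xyz % 10 < 10 := by omega
  have hb0 : 0 ≤ xyz / 10 % 10 := by omega
  have hb1 : xyz / 10 % 10 < 10 := by omega
  rw [cgLoop]
  rw [dif_pos (by omega : (0:Int) < xyz)]
  simp only [hm, hd, toChars_digit _ ha0 ha1, List.append_nil]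
  rw [if_neg (by simp)]
  rw [cgLoop]
  rw [dif_pos (by omega : (0:Int) < xyz / 10)]
  simp only [hm2, hd2, toChars_digit _ hb0 hb1, List.cons_append, List.nil_append]
  rw [if_pos (by simp)]
  rw [ofChars_two (xyz % 10) (xyz / 10 % 10) ha0 ha1 hb0 hb1]
  have hg : 10 * (xyz / 10 % 10) + xyz % 10 = xyz % 100 := by omega
  have hfd : xyz / 10 / 10 = xyz / 100 := by omega
  have hc0 : pyCharInt (Char.ofNat (48 + (xyz / 10 % 10).toNat)) = xyz / 10 % 10 :=
    pyCharInt_digit _ hb0 hb1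
  have hc1 : pyCharInt (Char.ofNat (48 + (xyz % 10).toNat)) = xyz % 10 := pyCharInt_digit _ ha0 ha1
  have hw1 : xyz / 10 % 10 * 10 = xyz % 100 / 10 * 10 := by omega
  simp only [Option.getD_some, hg, hfd, hc0, hc1, hw1]

-- ===== VERDICT (by name: the statement is the Claim_ definition above) =====
theorem convert_group_spec : Claim_equal_convert_group := by
  intro xyz d _hdom hpre
  unfold Spec_convert_group convert_group convert_group_alt
  cases hmem : pyDictGet? d xyz with
  | some w => rfl
  | none =>
    have h10 : 10 ≤ xyz := by
      rcases hpre with hpre | ⟨h10, _⟩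
      · rw [hmem] at hpre; simp at hpre
      · exact h10
    have hm100 : PySem.Int.mod xyz 100 = xyz % 100 := PySem.Int.mod_eq_emod_of_pos (by norm_num)
    have hd100 : PySem.Int.floordiv xyz 100 = xyz / 100 := PySem.Int.floordiv_eq_ediv_of_pos (by norm_num)
    have hl0 : 0 ≤ xyz % 100 := by omega
    have hl1 : xyz % 100 < 100 := by omega
    rw [cgLoop_eval d xyz h10]
    simp only [hm100, hd100]
    cases hg : pyDictGet? d (xyz % 100) with
    | some w =>
      by_cases hfd : xyz / 100 = 0
      · simp [hfd]
      · simp [hfd]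
    | none =>
      by_cases hfd : xyz / 100 = 0
      · simp [hfd]
      · simp [hfd]
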